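-- pv_equiv track=rewrite | github.com/Sendrowski/fastDFE | fastdfe/optimization.py | unpack_shared
-- ===== SOURCE A (Python) =====
-- def unpack_shared(params: dict) -> dict:
--     """
--     Unpack shared parameters. Here we extract shared parameters from joint-type keys
--     and add them tp the targeted types.
--
--     :param params: Dictionary of parameters
--     :return: Unpacked dictionary
--     """
--     unpacked = {}
--
--     for t, v in params.items():
--         if ':' in t:
--             unpacked = merge_dicts(unpacked, dict((s, v) for s in t.split(':')))
--         else:
--             unpacked[t] = v
--
--     return unpacked
--
-- def merge_dicts(dict1: dict, dict2: dict) -> dict: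
--     """
--     Merge two dictionaries recursively.
--
--     :param dict1: First dictionary
--     :param dict2: Second dictionary
--     :return: Merged dictionary
--     """
--     # make a copy of the first dictionary
--     result = dict(dict1)
--
--     # loop through the items in the second dictionary
--     for key, value in dict2.items():
--
--         # Check if the key already exists in the result dictionary and both the
--         # value in the result and dict2 dictionaries are dictionaries.
--         if key in result and isinstance(result[key], dict) and isinstance(value, dict):
--
--             # recursively merge the two dictionaries
--             result[key] = merge_dicts(result[key], value)
--         else:
--             # simply assign the value from dict2 to the result dictionary
--             result[key] = value
--
--     return result
-- ===== SOURCE B (Python) =====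
-- def unpack_shared(params: dict) -> dict:
--     """
--     Unpack shared parameters in two stages: first expand every entry into a
--     flat list of (type, value) pairs (splitting colon-joined keys), then build
--     the result dict from that list in one go (later pairs overwrite earlier
--     ones, keeping the first insertion position, as dict() does).
--     """
--     pairs = [
--         (s, v)
--         for t, v in params.items()
--         for s in (t.split(':') if ':' in t else [t])
--     ]
--     return dict(pairs)
-- ===== Notes on version B (the rewrite author's own statement) =====
-- stated objective: simpler
-- what changed: B is a two-stage pipeline: a comprehension flattens every entry into (key, value) pairs (splitting colon keys) and a single dict() constructor builds the result, replacing A's one-pass loop that builds a fresh dict per colon key and merges it into the accumulator with the recursive merge_dicts (which copies the whole accumulator each time).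
import Mathlib
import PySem

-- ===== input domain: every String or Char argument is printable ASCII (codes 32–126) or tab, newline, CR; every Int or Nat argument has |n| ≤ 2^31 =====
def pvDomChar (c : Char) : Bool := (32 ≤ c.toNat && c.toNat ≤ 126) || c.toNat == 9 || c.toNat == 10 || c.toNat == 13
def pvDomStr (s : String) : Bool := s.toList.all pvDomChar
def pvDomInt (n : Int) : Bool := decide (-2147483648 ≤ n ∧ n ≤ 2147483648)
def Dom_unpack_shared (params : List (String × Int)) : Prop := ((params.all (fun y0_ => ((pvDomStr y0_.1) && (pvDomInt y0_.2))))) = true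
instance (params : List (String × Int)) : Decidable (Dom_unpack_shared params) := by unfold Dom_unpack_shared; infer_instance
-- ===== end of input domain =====

-- B replaces A's accumulating loop (a fresh dict and a recursive merge_dicts, copying the whole
-- accumulator, per colon key) by a two-stage pipeline: flatten to a (key, value) pair list, then
-- build the dict from it in one go (objective: simpler).

-- ===== PORT A =====
-- Port of merge_dicts. The values here are Int, so the Python condition
-- `key in result and isinstance(result[key], dict) and isinstance(value, dict)` is always
-- False (neither value is a dict); the loop body is exactly `result[key] = value`, and
-- `dict(dict1)` (the copy) is dict1 itself under Lean's value semantics.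
def merge_dicts (dict1 dict2 : PySem.Dict String Int) : PySem.Dict String Int :=
  dict2.items.foldl (fun result kv => result.insert kv.1 kv.2) dict1

def unpack_shared (params : List (String × Int)) : List (String × Int) :=
  (params.foldl (fun unpacked tv =>
      if PySem.Str.isIn ":" tv.1 then
        merge_dicts unpacked (PySem.Dict.ofList ((((PySem.Str.split? tv.1 ":").getD [])).map (fun s => (s, tv.2))))
      else
        unpacked.insert tv.1 tv.2)
    PySem.Dict.empty).items

-- ===== PORT B =====
-- the inner comprehension: the pairs one params entry contributes
def pvPairsOf (tv : String × Int) : List (String × Int) :=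
  (if PySem.Str.isIn ":" tv.1 then (PySem.Str.split? tv.1 ":").getD [] else [tv.1]).map
    (fun s => (s, tv.2))

def unpack_shared_alt (params : List (String × Int)) : List (String × Int) :=
  (PySem.Dict.ofList (params.flatMap pvPairsOf)).items

-- ===== PRECONDITION & SPEC =====
def Spec_unpack_shared (params : List (String × Int)) (out : List (String × Int)) : Prop := out = unpack_shared_alt params
instance (params : List (String × Int)) (out : List (String × Int)) : Decidable (Spec_unpack_shared params out) := by unfold Spec_unpack_shared; infer_instance

-- ===== CLAIM (what is proved, stated in full; the proofs are below) =====
def Claim_equal_unpack_shared : Prop := ∀ (params : List (String × Int)), Dom_unpack_shared params → Spec_unpack_shared params (unpack_shared params)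

-- ===== LEMMAS AND PROOFS =====

-- Every value stored by the constant-value fold (A's dict comprehension) is v.
lemma snd_eq_of_mem_constFold (ks : List String) (v : Int) :
    ∀ p ∈ (ks.foldl (fun r s => r.insert s v) PySem.Dict.empty).items, p.2 = v := by
  induction ks using List.reverseRecOn with
  | nil => intro p hp; simp [PySem.Dict.empty] at hp
  | append_singleton l k ih =>
      intro p hp
      rw [List.foldl_append] at hp
      simp only [List.foldl_cons, List.foldl_nil] at hp
      rcases (PySem.Dict.mem_items_insert _ _ _ _).1 hp with h | ⟨h, _⟩
      · rw [h]
      · exact ih p h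

lemma contains_constFold (ks : List String) (v : Int) (e : PySem.Dict String Int) (k : String) :
    (ks.foldl (fun r s => r.insert s v) e).contains k = true ↔ (e.contains k = true ∨ k ∈ ks) := by
  induction ks generalizing e with
  | nil => simp
  | cons s t ih =>
      simp only [List.foldl_cons, ih, PySem.Dict.contains_insert, List.mem_cons]
      constructor
      · rintro (h | h)
        · rcases Bool.or_eq_true_iff.1 h with h | h
          · exact Or.inr (Or.inl (by simpa using h))
          · exact Or.inl h
        · exact Or.inr (Or.inr h)
      · rintro (h | h | h)
        · exact Or.inl (by simp [h])
        · exact Or.inl (by simp [h])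
        · exact Or.inr h

lemma get?_constFold_of_not_mem (ks : List String) (v : Int) (d : PySem.Dict String Int)
    (k : String) (h : k ∉ ks) :
    (ks.foldl (fun r s => r.insert s v) d).get? k = d.get? k := by
  induction ks generalizing d with
  | nil => rfl
  | cons s t ih =>
      simp only [List.foldl_cons]
      rw [ih _ (fun hk => h (List.mem_cons_of_mem _ hk))]
      have hne : k ≠ s := fun he => h (by rw [he]; exact List.mem_cons_self ..)
      rw [PySem.Dict.get?_insert_of_ne _ _ hne]

lemma get?_constFold_of_mem (ks : List String) (v : Int) (d : PySem.Dict String Int)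
    (k : String) (h : k ∈ ks) :
    (ks.foldl (fun r s => r.insert s v) d).get? k = some v := by
  induction ks generalizing d with
  | nil => cases h
  | cons s t ih =>
      simp only [List.foldl_cons]
      by_cases ht : k ∈ t
      · exact ih _ ht
      · have hk : k = s := by
          rcases List.mem_cons.1 h with h' | h'
          · exact h'
          · exact absurd h' ht
        rw [get?_constFold_of_not_mem t v _ k ht, hk, PySem.Dict.get?_insert_self]

-- Re-inserting a key with the value it already has is the identity (keys unique).
lemma insert_eq_self_of_get? (d : PySem.Dict String Int) (k : String) (v : Int)
    (hn : d.keys.Nodup) (h : d.get? k = some v) : d.insert k v = d := by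
  have hc : d.contains k = true := by rw [PySem.Dict.contains_eq_isSome_get?, h]; rfl
  apply PySem.Dict.ext
  rw [PySem.Dict.items_insert_of_contains _ _ hc]
  conv_rhs => rw [← List.map_id d.items]
  apply List.map_congr_left
  intro p hp
  by_cases hk : p.1 = k
  · have hg : d.get? p.1 = some p.2 := PySem.Dict.get?_of_mem_items _ (by simpa using hp) hn
    rw [hk, h] at hg
    simp [hk, ← Option.some_inj.1 hg, Prod.ext_iff]
  · simp [hk]

-- Key step: folding the items of A's freshly built dict into the accumulator equals
-- inserting the split-off keys with the shared value directly.
lemma foldl_items_constFold (ks : List String) (v : Int) :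
    ∀ (d : PySem.Dict String Int), d.keys.Nodup →
      ((ks.foldl (fun r s => r.insert s v) PySem.Dict.empty).items.foldl
          (fun result kv => result.insert kv.1 kv.2) d)
        = ks.foldl (fun r s => r.insert s v) d := by
  induction ks using List.reverseRecOn with
  | nil => intro d _; rfl
  | append_singleton l k ih =>
      intro d hd
      rw [List.foldl_append, List.foldl_append]
      simp only [List.foldl_cons, List.foldl_nil]
      by_cases hc : (l.foldl (fun r s => r.insert s v) PySem.Dict.empty).contains k = true
      · rw [PySem.Dict.items_insert_of_contains _ _ hc]
        have hmap : (l.foldl (fun r s => r.insert s v) PySem.Dict.empty).items.map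
            (fun p => if p.1 == k then (k, v) else p)
            = (l.foldl (fun r s => r.insert s v) PySem.Dict.empty).items := by
          conv_rhs => rw [← List.map_id ((l.foldl (fun r s => r.insert s v) PySem.Dict.empty)).items]
          apply List.map_congr_left
          intro p hp
          by_cases hk : p.1 = k
          · simp [hk, ← snd_eq_of_mem_constFold l v p hp, Prod.ext_iff]
          · simp [hk]
        rw [hmap, ih d hd]
        have hkl : k ∈ l := by
          rcases (contains_constFold l v PySem.Dict.empty k).1 hc with h | h
          · simp [PySem.Dict.contains_empty] at h
          · exact h
        exact (insert_eq_self_of_get? _ k v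
          (PySem.Dict.nodup_keys_foldl_insert l (fun _ _ => v) d hd)
          (get?_constFold_of_mem l v d k hkl)).symm
      · rw [PySem.Dict.items_insert_of_not_contains _ _ (by simpa using hc), List.foldl_append]
        simp only [List.foldl_cons, List.foldl_nil]
        rw [ih d hd]

-- Inserting any list of pairs preserves uniqueness of the keys.
lemma nodup_keys_foldl_insert_pairs (l : List (String × Int)) :
    ∀ (d : PySem.Dict String Int), d.keys.Nodup →
      (l.foldl (fun acc p => acc.insert p.1 p.2) d).keys.Nodup := by
  induction l with
  | nil => intro d hd; exact hd
  | cons p t ih =>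
      intro d hd
      exact ih _ (PySem.Dict.nodup_keys_insert d p.1 p.2 hd)

-- A's loop over params equals the fold that inserts each entry's expanded pairs directly,
-- from any accumulator with unique keys.
lemma loop_eq (params : List (String × Int)) :
    ∀ (d : PySem.Dict String Int), d.keys.Nodup →
      params.foldl (fun unpacked tv =>
          if PySem.Str.isIn ":" tv.1 then
            merge_dicts unpacked (PySem.Dict.ofList ((((PySem.Str.split? tv.1 ":").getD [])).map (fun s => (s, tv.2))))
          else unpacked.insert tv.1 tv.2) d
      = params.foldl (fun acc tv =>
          (pvPairsOf tv).foldl (fun acc p => acc.insert p.1 p.2) acc) d := by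
  induction params with
  | nil => intro d _; rfl
  | cons tv rest ih =>
      intro d hd
      simp only [List.foldl_cons]
      by_cases hcolon : PySem.Str.isIn ":" tv.1 = true
      · have hstep : merge_dicts d (PySem.Dict.ofList ((((PySem.Str.split? tv.1 ":").getD [])).map (fun s => (s, tv.2))))
            = (pvPairsOf tv).foldl (fun acc p => acc.insert p.1 p.2) d := by
          show ((PySem.Dict.ofList ((((PySem.Str.split? tv.1 ":").getD [])).map (fun s => (s, tv.2)))).items.foldl
            (fun result kv => result.insert kv.1 kv.2) d) = _
          have hof : PySem.Dict.ofList ((((PySem.Str.split? tv.1 ":").getD [])).map (fun s => (s, tv.2)))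
              = (((PySem.Str.split? tv.1 ":").getD [])).foldl (fun r s => r.insert s tv.2) PySem.Dict.empty := by
            show ((((PySem.Str.split? tv.1 ":").getD [])).map (fun s => (s, tv.2))).foldl
              (fun acc p => acc.insert p.1 p.2) PySem.Dict.empty = _
            rw [List.foldl_map]
          have hB : (pvPairsOf tv).foldl (fun acc p => acc.insert p.1 p.2) d
              = (((PySem.Str.split? tv.1 ":").getD [])).foldl (fun r s => r.insert s tv.2) d := by
            rw [pvPairsOf, hcolon]
            simp only [if_true, List.foldl_map]
          rw [hof, hB, foldl_items_constFold _ _ d hd]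
        rw [hcolon]
        simp only [if_true]
        rw [hstep]
        exact ih _ (nodup_keys_foldl_insert_pairs (pvPairsOf tv) d hd)
      · rw [Bool.not_eq_true] at hcolon
        rw [hcolon]
        simp only [Bool.false_eq_true, if_false]
        have hB : (pvPairsOf tv).foldl (fun acc p => acc.insert p.1 p.2) d = d.insert tv.1 tv.2 := by
          rw [pvPairsOf, hcolon]
          simp only [Bool.false_eq_true, if_false, List.map_cons, List.map_nil,
            List.foldl_cons, List.foldl_nil]
        rw [← hB]
        exact ih _ (by rw [hB]; exact PySem.Dict.nodup_keys_insert d tv.1 tv.2 hd)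

-- ===== VERDICT (by name: the statement is the Claim_ definition above) =====
theorem unpack_shared_spec : Claim_equal_unpack_shared := by
  intro params _
  show unpack_shared params = unpack_shared_alt params
  unfold unpack_shared unpack_shared_alt
  rw [show PySem.Dict.ofList (params.flatMap pvPairsOf)
        = (params.flatMap pvPairsOf).foldl (fun acc p => acc.insert p.1 p.2) PySem.Dict.empty from rfl,
     List.foldl_flatMap]
  rw [loop_eq params PySem.Dict.empty PySem.Dict.nodup_keys_empty]
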